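-- pv_equiv track=rewrite | github.com/aryashubhavi/Artificial_Intelligence_IU | abudhkar-aryas-jstrieb-a1/part3/assign.py | check_if_all_students_assigned
-- ===== SOURCE A (Python) =====
-- def check_if_all_students_assigned(students, teams):
--     students_in_team = []
--     for team in teams:
--         for student in team:
--             students_in_team.append(student)
--     for student in students:
--         if( student not in students_in_team):
--             return False
--     return True
-- ===== SOURCE B (Python) =====
-- def check_if_all_students_assigned(students, teams):
--     # Shrink the set of still-unassigned students team by team; stop early once empty.
--     missing = set(students)
--     for team in teams:
--         if not missing:
--             return True
--         missing -= set(team)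
--     return not missing
-- ===== Notes on version B (the rewrite author's own statement) =====
-- stated objective: alternative
-- what changed: Instead of flattening teams and testing each student's membership, B iterates over teams shrinking a set of still-missing students by set difference (with early exit once empty) and returns whether any remain; there is no loop over students and no membership test.
import Mathlib
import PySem

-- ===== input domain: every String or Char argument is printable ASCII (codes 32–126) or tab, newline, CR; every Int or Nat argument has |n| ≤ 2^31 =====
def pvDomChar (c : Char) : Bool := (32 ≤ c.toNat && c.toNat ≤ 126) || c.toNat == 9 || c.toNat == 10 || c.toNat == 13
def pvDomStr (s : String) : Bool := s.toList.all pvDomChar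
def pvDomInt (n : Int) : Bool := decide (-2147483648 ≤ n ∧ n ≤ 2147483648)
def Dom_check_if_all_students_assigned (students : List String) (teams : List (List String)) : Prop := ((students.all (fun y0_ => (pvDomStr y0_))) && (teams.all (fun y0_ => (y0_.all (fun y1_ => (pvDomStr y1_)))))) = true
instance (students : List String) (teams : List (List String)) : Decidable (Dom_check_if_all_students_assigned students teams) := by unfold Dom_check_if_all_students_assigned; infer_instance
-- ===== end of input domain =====

-- B replaces A's flattened membership list and per-student membership loop by a single
-- pass over teams that shrinks a set of still-missing students (early exit once empty);
-- objective: alternative.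

-- ===== PORT A =====
-- the second loop of A: early-return False on the first student not in students_in_team
def pvACheck (sit : List String) : List String → Bool
  | [] => true
  | s :: rest => if !(sit.contains s) then false else pvACheck sit rest

def check_if_all_students_assigned (students : List String) (teams : List (List String)) : Bool :=
  let students_in_team := teams.foldl (fun acc team => team.foldl (fun a s => a ++ [s]) acc) []
  pvACheck students_in_team students

-- ===== PORT B =====
-- B's loop over teams: early-return True once `missing` is empty, else subtract the team
def pvBLoop (missing : PySem.Set String) : List (List String) → Bool
  | [] => missing.isEmpty
  | t :: ts => if missing.isEmpty then true else pvBLoop (PySem.Set.diff missing t) ts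

def check_if_all_students_assigned_alt (students : List String) (teams : List (List String)) : Bool :=
  pvBLoop (PySem.Set.ofList students) teams

-- ===== PRECONDITION & SPEC =====
def Spec_check_if_all_students_assigned (students : List String) (teams : List (List String)) (out : Bool) : Prop := out = check_if_all_students_assigned_alt students teams
instance (students : List String) (teams : List (List String)) (out : Bool) : Decidable (Spec_check_if_all_students_assigned students teams out) := by unfold Spec_check_if_all_students_assigned; infer_instance

-- ===== CLAIM (what is proved, stated in full; the proofs are below) =====
def Claim_equal_check_if_all_students_assigned : Prop := ∀ (students : List String) (teams : List (List String)), Dom_check_if_all_students_assigned students teams → Spec_check_if_all_students_assigned students teams (check_if_all_students_assigned students teams)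

-- ===== LEMMAS AND PROOFS =====

-- A's inner append loop over a team is plain list append
theorem pv_inner_append (team acc : List String) :
    team.foldl (fun a s => a ++ [s]) acc = acc ++ team := by
  induction team generalizing acc with
  | nil => simp
  | cons x xs ih => simp [List.foldl, ih]

-- A's students_in_team is the flattening of teams
theorem pv_sit_eq_flatten (teams : List (List String)) (acc : List String) :
    teams.foldl (fun acc team => team.foldl (fun a s => a ++ [s]) acc) acc = acc ++ teams.flatten := by
  induction teams generalizing acc with
  | nil => simp
  | cons t ts ih => rw [List.foldl_cons, pv_inner_append, ih]; simp

-- A's early-return loop is an 'all' over students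
theorem pv_check_eq_all (sit : List String) (l : List String) :
    pvACheck sit l = l.all (fun s => sit.contains s) := by
  induction l with
  | nil => rfl
  | cons s rest ih =>
      by_cases h : sit.contains s <;> simp [pvACheck, ih]

-- B's shrinking loop succeeds iff every still-missing student occurs in some remaining team
theorem pv_bloop_iff (ts : List (List String)) (missing : PySem.Set String) :
    pvBLoop missing ts = true ↔ ∀ x ∈ missing, x ∈ ts.flatten := by
  induction ts generalizing missing with
  | nil =>
      simp [pvBLoop, List.isEmpty_iff, List.eq_nil_iff_forall_not_mem]
  | cons t ts ih =>
      by_cases h : missing.isEmpty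
      · simp only [pvBLoop, h, if_true, true_iff]
        intro x hx
        rw [List.isEmpty_iff] at h
        simp [h] at hx
      · rw [show pvBLoop missing (t :: ts) = pvBLoop (PySem.Set.diff missing t) ts from by
            simp [pvBLoop, h], ih]
        constructor
        · intro hall x hx
          by_cases hxt : x ∈ t
          · simp [List.flatten_cons, hxt]
          · have := hall x (by rw [PySem.Set.mem_diff]; exact ⟨hx, hxt⟩)
            simp [List.flatten_cons, this]
        · intro hall x hx
          rw [PySem.Set.mem_diff] at hx
          have := hall x hx.1
          simp only [List.flatten_cons, List.mem_append] at this
          exact this.resolve_left hx.2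

-- ===== VERDICT (by name: the statement is the Claim_ definition above) =====
theorem check_if_all_students_assigned_spec : Claim_equal_check_if_all_students_assigned := by
  intro students teams _
  unfold Spec_check_if_all_students_assigned
  unfold check_if_all_students_assigned check_if_all_students_assigned_alt
  simp only [pv_sit_eq_flatten, List.nil_append, pv_check_eq_all]
  rw [Bool.eq_iff_iff, pv_bloop_iff]
  simp [PySem.Set.mem_ofList]
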